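-- pv_equiv track=rewrite | github.com/whtlkeep/BAT-algorithms | Array & String/L_零子数组.py | min_sub_array_num
-- ===== SOURCE A (Python) =====
-- def min_sub_array_num(nums):
--     size = len(nums)
--     sum_ = [0] * (size + 1)
--     i = 1
--     for a in nums:
--         sum_[i] = sum_[i - 1] + a
--         i += 1
--     sum_ = sorted(sum_)
--     difference = abs(sum_[1] - sum_[0])  # 差值
--     result = difference
--     for i in range(1, size):
--         difference = abs(sum_[i + 1] - sum_[i])
--         result = min(difference, result)
--     del sum_
--     return result
-- ===== SOURCE B (Python) =====
-- def min_sub_array_num(nums):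
--     sums = [0]
--     for a in nums:
--         sums.append(sums[-1] + a)
--     result = abs(sums[1] - sums[0])
--     rest = sums
--     while rest:
--         x = rest[0]
--         rest = rest[1:]
--         for y in rest:
--             result = min(result, abs(y - x))
--     return result
-- ===== Notes on version B (the rewrite author's own statement) =====
-- stated objective: alternative
-- what changed: Replaced the sort of the prefix-sum array followed by a scan of adjacent differences with a direct minimum over |sums[j]-sums[i]| for all index pairs i<j, with no sorting.
-- outside the precondition, e.g. on min_sub_array_num([]): A raises IndexError, B raises IndexError
import Mathlib
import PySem

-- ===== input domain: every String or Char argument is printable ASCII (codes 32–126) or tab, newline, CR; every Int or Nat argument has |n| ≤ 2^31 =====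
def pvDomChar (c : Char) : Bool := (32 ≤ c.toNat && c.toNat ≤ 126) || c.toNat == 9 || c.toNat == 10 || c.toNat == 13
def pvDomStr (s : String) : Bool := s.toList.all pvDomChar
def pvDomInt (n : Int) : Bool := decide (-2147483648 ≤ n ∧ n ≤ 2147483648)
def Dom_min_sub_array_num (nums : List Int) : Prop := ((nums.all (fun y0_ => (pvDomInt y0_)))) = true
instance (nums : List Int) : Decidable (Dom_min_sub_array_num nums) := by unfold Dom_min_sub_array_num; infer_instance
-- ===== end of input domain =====

-- B replaces A's sort-then-adjacent-difference scan by a sort-free minimum over all pairs of prefix sums (alternative algorithm, same results).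


-- ===== PORT A =====
-- A builds sum_ = [0]*(size+1) and fills it by indexed assignment (sum_[i] = sum_[i-1] + a);
-- ported as a fold carrying the list and the running index i.
def min_sub_array_num (nums : List Int) : Int :=
  let size : Int := nums.length
  let sum0 : List Int := List.replicate (nums.length + 1) 0
  let sum_ :=
    (nums.foldl
      (fun (st : List Int × Int) a =>
        (PySem.List.pySetD st.1 st.2 (PySem.List.pyGetD st.1 (st.2 - 1) 0 + a), st.2 + 1))
      (sum0, 1)).1
  let sorted_ := PySem.List.sorted sum_ (fun x => x) false
  let difference := |PySem.List.pyGetD sorted_ 1 0 - PySem.List.pyGetD sorted_ 0 0|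
  (PySem.List.pyRange 1 size 1).foldl
    (fun result i =>
      min (|PySem.List.pyGetD sorted_ (i + 1) 0 - PySem.List.pyGetD sorted_ i 0|) result)
    difference

-- ===== PORT B =====
-- B's prefix-sum list built by appending sums[-1] + a, carrying the running last value.
def pvPrefB (c : Int) : List Int → List Int
  | [] => [c]
  | a :: t => c :: pvPrefB (c + a) t

-- B's while-loop: peel the head x, fold the minimum of |y - x| over the rest, recurse on the rest.
def pvPairMin (r : Int) : List Int → Int
  | [] => r
  | x :: rest => pvPairMin (rest.foldl (fun r y => min r |y - x|) r) rest

def min_sub_array_num_alt (nums : List Int) : Int :=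
  let sums := pvPrefB 0 nums
  let result := |PySem.List.pyGetD sums 1 0 - PySem.List.pyGetD sums 0 0|
  pvPairMin result sums

-- ===== PRECONDITION & SPEC =====
-- On nums = [] both A and B raise IndexError (sum_[1] on the one-element prefix list [0]); excluded.
def Pre_min_sub_array_num (nums : List Int) : Prop := nums ≠ []
instance (nums : List Int) : Decidable (Pre_min_sub_array_num nums) := by unfold Pre_min_sub_array_num; infer_instance
def pvWitness_min_sub_array_num : List Int := ([1, -2, 3])

def Spec_min_sub_array_num (nums : List Int) (out : Int) : Prop := out = min_sub_array_num_alt nums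
instance (nums : List Int) (out : Int) : Decidable (Spec_min_sub_array_num nums out) := by unfold Spec_min_sub_array_num; infer_instance

-- ===== CLAIM (what is proved, stated in full; the proofs are below) =====
def Claim_equal_min_sub_array_num : Prop := ∀ (nums : List Int), Dom_min_sub_array_num nums → Pre_min_sub_array_num nums → Spec_min_sub_array_num nums (min_sub_array_num nums)

-- ===== LEMMAS AND PROOFS =====

-- the list of adjacent absolute differences
def pvAdj : List Int → List Int
  | a :: b :: t => |b - a| :: pvAdj (b :: t)
  | _ => []

-- the list of |y - x| over all ordered pairs (x before y)
def pvAllp : List Int → List Int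
  | [] => []
  | a :: t => t.map (fun b => |b - a|) ++ pvAllp t

-- min of a nonempty list x::t as foldl
theorem pvFmin_spec (x : Int) (t : List Int) :
    t.foldl min x ∈ x :: t ∧ ∀ b ∈ x :: t, t.foldl min x ≤ b :=
  (List.min?_eq_some_iff).mp rfl

theorem pvFmin_eq {x1 x2 : Int} {t1 t2 : List Int}
    (h12 : ∀ y ∈ x2 :: t2, ∃ z ∈ x1 :: t1, z ≤ y)
    (h21 : ∀ y ∈ x1 :: t1, ∃ z ∈ x2 :: t2, z ≤ y) :
    t1.foldl min x1 = t2.foldl min x2 := by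
  obtain ⟨m1, le1⟩ := pvFmin_spec x1 t1
  obtain ⟨m2, le2⟩ := pvFmin_spec x2 t2
  obtain ⟨z, hz, hzle⟩ := h12 _ m2
  obtain ⟨w, hw, hwle⟩ := h21 _ m1
  exact le_antisymm (le_trans (le1 _ hz) hzle) (le_trans (le2 _ hw) hwle)

-- every adjacent difference is a pair difference
theorem pvAdj_subset : ∀ (s : List Int), ∀ x ∈ pvAdj s, x ∈ pvAllp s
  | a :: b :: t, x, hx => by
    simp only [pvAdj, List.mem_cons] at hx
    rcases hx with rfl | hx
    · simp [pvAllp]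
    · have := pvAdj_subset (b :: t) x hx
      simp only [pvAllp, List.mem_append] at this ⊢
      tauto

-- on a sorted list, every pair difference dominates some adjacent difference
theorem pvSorted_pair_ge : ∀ (s : List Int), s.Pairwise (· ≤ ·) →
    ∀ y ∈ pvAllp s, ∃ x ∈ pvAdj s, x ≤ y
  | [], _, y, hy => by simp [pvAllp] at hy
  | [a], _, y, hy => by simp [pvAllp] at hy
  | a :: c :: t, hp, y, hy => by
    have hac : a ≤ c := (List.pairwise_cons.mp hp).1 _ (by simp)
    have hct : ∀ b ∈ t, c ≤ b := fun b hb =>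
      (List.pairwise_cons.mp ((List.pairwise_cons.mp hp).2)).1 b hb
    have hy' : y ∈ (c :: t).map (fun b => |b - a|) ++ pvAllp (c :: t) := hy
    rcases List.mem_append.mp hy' with h1 | h2
    · obtain ⟨b, hb, rfl⟩ := List.mem_map.mp h1
      refine ⟨|c - a|, by simp [pvAdj], ?_⟩
      rcases List.mem_cons.mp hb with rfl | hb
      · exact le_refl _
      · have hcb : c ≤ b := hct b hb
        rw [abs_of_nonneg (by omega), abs_of_nonneg (by omega)]
        omega
    · obtain ⟨x, hx, hle⟩ := pvSorted_pair_ge (c :: t) (List.pairwise_cons.mp hp).2 y h2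
      exact ⟨x, by simp [pvAdj, List.mem_cons]; tauto, hle⟩

-- pvAllp is permutation-invariant up to permutation
theorem pvAllp_perm {l l' : List Int} (h : l.Perm l') : (pvAllp l).Perm (pvAllp l') := by
  induction h with
  | nil => exact List.Perm.refl _
  | cons a h ih => exact List.Perm.append (h.map _) ih
  | swap a b l =>
      simp only [pvAllp, List.map_cons, List.cons_append]
      rw [abs_sub_comm a b]
      refine List.Perm.cons _ ?_
      rw [← List.append_assoc, ← List.append_assoc]
      exact List.Perm.append_right _ (List.perm_append_comm)
  | trans h1 h2 ih1 ih2 => exact ih1.trans ih2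

theorem pvPrefB_length (c : Int) (l : List Int) : (pvPrefB c l).length = l.length + 1 := by
  induction l generalizing c with
  | nil => rfl
  | cons a t ih => simp [pvPrefB, ih]

-- A's fill loop writes exactly the prefix-sum list
theorem pvFill : ∀ (nums : List Int) (pre : List Int) (c : Int),
    (nums.foldl (fun (st : List Int × Int) a =>
        (PySem.List.pySetD st.1 st.2 (PySem.List.pyGetD st.1 (st.2 - 1) 0 + a), st.2 + 1))
      (pre ++ c :: List.replicate nums.length 0, (pre.length : Int) + 1)).1
     = pre ++ pvPrefB c nums
  | [], pre, c => by simp [pvPrefB]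
  | a :: t, pre, c => by
    rw [List.foldl_cons]
    have hget : PySem.List.pyGetD (pre ++ c :: List.replicate (a :: t).length 0)
        (((pre.length : Int) + 1) - 1) 0 = c := by
      have : ((pre.length : Int) + 1) - 1 = ((pre.length : Nat) : Int) := by ring
      rw [this, PySem.List.pyGetD_natCast]
      simp [List.getD_eq_getElem?_getD]
    have hset : PySem.List.pySetD (pre ++ c :: List.replicate (a :: t).length 0)
        ((pre.length : Int) + 1) (c + a)
        = (pre ++ [c]) ++ (c + a) :: List.replicate t.length 0 := by
      have h1 : ((pre.length : Int) + 1) = ((pre.length + 1 : Nat) : Int) := by push_cast; ring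
      rw [h1, PySem.List.pySetD_natCast]
      rw [show (a :: t).length = t.length + 1 from rfl]
      simp [List.replicate_succ, List.set]
    simp only [hget, hset]
    have h2 : ((pre.length : Int) + 1) + 1 = (((pre ++ [c]).length : Nat) : Int) + 1 := by
      simp
    rw [h2]
    rw [pvFill t (pre ++ [c]) (c + a)]
    simp [pvPrefB]

-- B's loop is a foldl of min over the all-pairs difference list
theorem pvPairMin_eq (l : List Int) : ∀ r : Int, pvPairMin r l = (pvAllp l).foldl min r := by
  induction l with
  | nil => intro r; rfl
  | cons x rest ih =>
      intro r
      rw [show pvPairMin r (x :: rest) = pvPairMin (rest.foldl (fun r y => min r |y - x|) r) rest from rfl]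
      rw [ih, show pvAllp (x :: rest) = rest.map (fun b => |b - x|) ++ pvAllp rest from rfl]
      rw [List.foldl_append, List.foldl_map]

-- adjacent differences as a map over positions
theorem pvAdj_eq_map : ∀ (s : List Int),
    pvAdj s = (List.range (s.length - 1)).map (fun k => |s.getD (k + 1) 0 - s.getD k 0|)
  | [] => rfl
  | [a] => rfl
  | a :: b :: t => by
    rw [show pvAdj (a :: b :: t) = |b - a| :: pvAdj (b :: t) from rfl, pvAdj_eq_map (b :: t)]
    rw [show (a :: b :: t).length - 1 = ((b :: t).length - 1) + 1 from by simp]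
    rw [List.range_succ_eq_map]
    simp [List.map_map, Function.comp_def]

-- flip of the accumulator in A's min fold
theorem pvFoldFlip (f : Int → Int) : ∀ (l : List Int) (d : Int),
    l.foldl (fun r i => min (f i) r) d = l.foldl (fun r i => min r (f i)) d
  | [], d => rfl
  | i :: l, d => by
    rw [List.foldl_cons, List.foldl_cons, min_comm (f i) d, pvFoldFlip f l (min d (f i))]

theorem pvMain (nums : List Int) (h : nums ≠ []) :
    min_sub_array_num nums = min_sub_array_num_alt nums := by
  obtain ⟨a, t', rfl⟩ := List.exists_cons_of_ne_nil h
  -- names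
  set P := pvPrefB 0 (a :: t') with hPdef
  set s := PySem.List.sorted P (fun x => x) false with hsdef
  set n := (a :: t').length with hn
  -- decompositions
  obtain ⟨p1, ptail, hP2⟩ : ∃ p1 ptail, pvPrefB (0 + a) t' = p1 :: ptail := by
    cases t' <;> exact ⟨_, _, rfl⟩
  have hPcons : P = 0 :: p1 :: ptail := by rw [hPdef, pvPrefB, hP2]
  have hslen : s.length = n + 1 := by
    rw [hsdef, PySem.List.length_sorted, hPdef, pvPrefB_length]
  obtain ⟨m0, m1, r, hscons⟩ : ∃ m0 m1 r, s = m0 :: m1 :: r := by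
    match hs : s with
    | [] => simp [hn] at hslen
    | [x] => simp [hn] at hslen
    | x :: y :: r => exact ⟨x, y, r, rfl⟩
  -- A's fill loop produces P
  have hsum : ((a :: t').foldl
      (fun (st : List Int × Int) b =>
        (PySem.List.pySetD st.1 st.2 (PySem.List.pyGetD st.1 (st.2 - 1) 0 + b), st.2 + 1))
      (List.replicate ((a :: t').length + 1) 0, 1)).1 = P := by
    have := pvFill (a :: t') [] 0
    simpa [List.replicate_succ] using this
  -- B side
  have hallp : pvAllp P = |p1 - 0| :: (ptail.map (fun b => |b - 0|) ++ pvAllp (p1 :: ptail)) := by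
    rw [hPcons]; rfl
  have hBval : min_sub_array_num_alt (a :: t') =
      (ptail.map (fun b => |b - 0|) ++ pvAllp (p1 :: ptail)).foldl min (|p1 - 0|) := by
    simp only [min_sub_array_num_alt]
    rw [← hPdef, hPcons]
    have hg1 : PySem.List.pyGetD ((0:Int) :: p1 :: ptail) 1 0 = p1 := by simp [pysem]
    have hg0 : PySem.List.pyGetD ((0:Int) :: p1 :: ptail) 0 0 = (0:Int) := by simp [pysem]
    rw [hg1, hg0, pvPairMin_eq]
    rw [show pvAllp ((0:Int) :: p1 :: ptail)
        = |p1 - 0| :: (ptail.map (fun b => |b - 0|) ++ pvAllp (p1 :: ptail)) from rfl]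
    rw [List.foldl_cons, min_self]
  -- A side
  have hpair : s.Pairwise (· ≤ ·) := by
    simpa using PySem.List.sorted_pairwise P (fun x => x)
  have hperm : (pvAllp s).Perm (pvAllp P) := pvAllp_perm (PySem.List.sorted_perm P (fun x => x) false)
  set f : Int → Int := fun i => |PySem.List.pyGetD s (i + 1) 0 - PySem.List.pyGetD s i 0| with hf
  have hAval : min_sub_array_num (a :: t') =
      ((PySem.List.pyRange 1 ((n : Int)) 1).map f).foldl min (f 0) := by
    simp only [min_sub_array_num]
    rw [hsum, ← hsdef, ← hn, List.foldl_map, pvFoldFlip]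
    rfl
  have hadjmap : (PySem.List.pyRange 0 ((n : Int)) 1).map f = pvAdj s := by
    rw [pvAdj_eq_map s, hslen]
    simp only [Nat.add_sub_cancel]
    rw [PySem.List.pyRange_zero_nat, List.map_map]
    apply List.map_congr_left
    intro k hk
    show f ((k : Int)) = _
    rw [hf]
    have h1 : ((k : Int) + 1) = (((k + 1 : Nat)) : Int) := by push_cast; ring
    simp only [h1, PySem.List.pyGetD_natCast]
  have hnpos : (0 : Int) < (n : Int) := by simp [hn]
  have hadj : pvAdj s = f 0 :: (PySem.List.pyRange 1 ((n : Int)) 1).map f := by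
    rw [← hadjmap, PySem.List.pyRange_one_cons hnpos]
    norm_num
  rw [hAval, hBval]
  apply pvFmin_eq
  · intro y hy
    have hyP : y ∈ pvAllp P := by rw [hallp]; exact hy
    have hys : y ∈ pvAllp s := hperm.mem_iff.mpr hyP
    obtain ⟨z, hz, hzle⟩ := pvSorted_pair_ge s hpair y hys
    exact ⟨z, by rw [← hadj]; exact hz, hzle⟩
  · intro y hy
    have hys : y ∈ pvAdj s := by rw [hadj]; exact hy
    have hyP : y ∈ pvAllp P := hperm.mem_iff.mp (pvAdj_subset s y hys)
    exact ⟨y, by rw [← hallp]; exact hyP, le_refl y⟩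

-- ===== VERDICT (by name: the statement is the Claim_ definition above) =====
theorem min_sub_array_num_spec : Claim_equal_min_sub_array_num := by
  intro nums _ hpre
  show min_sub_array_num nums = min_sub_array_num_alt nums
  exact pvMain nums hpre
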